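-- pv_equiv track=rewrite | github.com/hddev244/contest_hd_tech | loop/baiN/tao_testcase.py | create_hollow_square
-- ===== SOURCE A (Python) =====
-- def create_hollow_square(n):
--     """Generate hollow square pattern"""
--     result = []
--     for i in range(n):
--         line = ""
--         for j in range(n):
--             if i == 0 or i == n-1 or j == 0 or j == n-1:
--                 line += "*"
--             else:
--                 line += " "
--         result.append(line)
--     return result
-- ===== SOURCE B (Python) =====
-- def create_hollow_square(n):
--     """Generate hollow square pattern"""
--     if n <= 0:
--         return []
--     if n == 1:
--         return ["*"]
--     border = "*" * n
--     middle = "*" + " " * (n - 2) + "*"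
--     return [border] + [middle] * (n - 2) + [border]
-- ===== Notes on version B (the rewrite author's own statement) =====
-- stated objective: simpler
-- what changed: Builds each whole row at once (border and middle strings via string repetition, middle rows replicated) instead of the nested per-cell loop with a four-way border test, with explicit early returns for degenerate sizes.
import Mathlib
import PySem

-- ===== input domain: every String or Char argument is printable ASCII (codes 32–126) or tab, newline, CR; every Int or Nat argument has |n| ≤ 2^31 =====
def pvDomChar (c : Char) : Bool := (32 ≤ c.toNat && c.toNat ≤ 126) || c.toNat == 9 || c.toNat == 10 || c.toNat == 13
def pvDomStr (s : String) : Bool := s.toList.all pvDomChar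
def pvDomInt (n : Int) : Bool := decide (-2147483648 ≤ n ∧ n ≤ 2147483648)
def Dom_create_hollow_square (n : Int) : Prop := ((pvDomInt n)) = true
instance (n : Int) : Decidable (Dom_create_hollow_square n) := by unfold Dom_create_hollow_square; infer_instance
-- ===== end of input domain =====

-- B builds each row as a whole string (border / middle) instead of A's per-cell nested loop; objective: simpler.
-- Python string accumulation is modeled exactly on List Char (String.ofList at the append to result).

-- ===== PORT A =====
def create_hollow_square (n : Int) : List String :=
  (PySem.List.pyRange 0 n 1).foldl (fun result i =>
    result ++ [String.ofList ((PySem.List.pyRange 0 n 1).foldl (fun line j =>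
      line ++ (if i = 0 ∨ i = n - 1 ∨ j = 0 ∨ j = n - 1 then ['*'] else [' '])) [])]) []

-- ===== PORT B =====
def create_hollow_square_alt (n : Int) : List String :=
  if n ≤ 0 then []
  else if n = 1 then ["*"]
  else
    let border := String.ofList (List.replicate n.toNat '*')
    let middle := String.ofList ('*' :: (List.replicate (n - 2).toNat ' ' ++ ['*']))
    (border :: List.replicate (n - 2).toNat middle) ++ [border]

-- ===== PRECONDITION & SPEC =====
def Spec_create_hollow_square (n : Int) (out : List String) : Prop := out = create_hollow_square_alt n
instance (n : Int) (out : List String) : Decidable (Spec_create_hollow_square n out) := by unfold Spec_create_hollow_square; infer_instance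

-- ===== CLAIM (what is proved, stated in full; the proofs are below) =====
def Claim_equal_create_hollow_square : Prop := ∀ (n : Int), Dom_create_hollow_square n → Spec_create_hollow_square n (create_hollow_square n)

-- ===== LEMMAS AND PROOFS =====

-- a range-map whose value is b at the two endpoints and mid in between is b :: middles ++ [b]
lemma rowShape {α : Type} (m : Nat) (b mid : α) :
    (List.range (m + 2)).map (fun k => if k = 0 ∨ k = m + 1 then b else mid) =
      b :: (List.replicate m mid ++ [b]) := by
  rw [List.range_succ, List.map_append]
  have h2 : (List.range (m + 1)).map (fun k => if k = 0 ∨ k = m + 1 then b else mid) =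
      (List.range (m + 1)).map (fun k => if k = 0 then b else mid) := by
    apply List.map_congr_left
    intro k hk
    have hne : k ≠ m + 1 := by have := List.mem_range.mp hk; omega
    simp [hne]
  rw [h2, List.range_succ_eq_map, List.map_cons, List.map_map]
  have hmid : ((fun k => if k = 0 then b else mid) ∘ Nat.succ) = fun _ : Nat => mid := by
    funext k; simp
  rw [hmid]
  simp

-- A's inner loop output for row k of an (m+2)-square: border chars or middle chars
lemma rowChars (m k : Nat) (hk : k < m + 2) :
    (List.range (m + 2)).map (fun j : Nat =>
      if (k : Int) = 0 ∨ (k : Int) = (m : Int) + 2 - 1 ∨ (j : Int) = 0 ∨ (j : Int) = (m : Int) + 2 - 1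
      then '*' else ' ') =
    if k = 0 ∨ k = m + 1 then List.replicate (m + 2) '*'
    else '*' :: (List.replicate m ' ' ++ ['*']) := by
  by_cases hk0 : k = 0 ∨ k = m + 1
  · rw [if_pos hk0]
    have h1 : (List.range (m + 2)).map (fun j : Nat =>
        if (k : Int) = 0 ∨ (k : Int) = (m : Int) + 2 - 1 ∨ (j : Int) = 0 ∨ (j : Int) = (m : Int) + 2 - 1
        then '*' else ' ') = (List.range (m + 2)).map (fun _ => '*') := by
      apply List.map_congr_left
      intro j _
      have hc : (k : Int) = 0 ∨ (k : Int) = (m : Int) + 2 - 1 ∨ (j : Int) = 0 ∨ (j : Int) = (m : Int) + 2 - 1 := by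
        rcases hk0 with h | h
        · left; exact_mod_cast congrArg (fun x : Nat => (x : Int)) h
        · right; left; subst h; push_cast; ring
      rw [if_pos hc]
    rw [h1]
    simp
  · rw [if_neg hk0]
    have h1 : (List.range (m + 2)).map (fun j : Nat =>
        if (k : Int) = 0 ∨ (k : Int) = (m : Int) + 2 - 1 ∨ (j : Int) = 0 ∨ (j : Int) = (m : Int) + 2 - 1
        then '*' else ' ') = (List.range (m + 2)).map (fun j => if j = 0 ∨ j = m + 1 then '*' else ' ') := by
      apply List.map_congr_left
      intro j _
      have hiff : ((k : Int) = 0 ∨ (k : Int) = (m : Int) + 2 - 1 ∨ (j : Int) = 0 ∨ (j : Int) = (m : Int) + 2 - 1)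
          ↔ (j = 0 ∨ j = m + 1) := by
        constructor
        · rintro (h | h | h | h) <;> [exact absurd (by omega : k = 0) (fun hh => hk0 (Or.inl hh));
            exact absurd (by omega : k = m + 1) (fun hh => hk0 (Or.inr hh)); exact Or.inl (by omega);
            exact Or.inr (by omega)]
        · rintro (h | h)
          · right; right; left; omega
          · right; right; right; omega
      by_cases hc : j = 0 ∨ j = m + 1
      · rw [if_pos (hiff.mpr hc), if_pos hc]
      · rw [if_neg (fun hh => hc (hiff.mp hh)), if_neg hc]
    rw [h1, rowShape]

theorem create_hollow_square_spec : Claim_equal_create_hollow_square := by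
  intro n _
  unfold Spec_create_hollow_square create_hollow_square create_hollow_square_alt
  by_cases hn0 : n ≤ 0
  · rw [PySem.List.pyRange_one_eq_nil hn0]
    simp [hn0]
  · by_cases hn1 : n = 1
    · subst hn1; decide
    · rw [if_neg hn0, if_neg hn1]
      obtain ⟨m, hm⟩ : ∃ m : Nat, n = (m : Int) + 2 := ⟨(n - 2).toNat, by omega⟩
      subst hm
      have htoNat : ((m : Int) + 2).toNat = m + 2 := by omega
      have htoNat2 : ((m : Int) + 2 - 2).toNat = m := by omega
      have hrng : PySem.List.pyRange 0 ((m : Int) + 2) 1 =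
          (List.range (m + 2)).map (fun k : Nat => (k : Int)) := by
        have h0 : ((m : Int) + 2 - 0).toNat = m + 2 := by omega
        rw [PySem.List.pyRange_one, h0]
        simp only [zero_add]
      simp only [PySem.List.foldl_append_singleton_eq_map, PySem.List.foldl_append_eq_flatMap,
        List.nil_append, hrng, htoNat, htoNat2, List.map_map, List.flatMap_map]
      have hrow : ∀ k ∈ List.range (m + 2),
          ((fun i => String.ofList ((List.range (m + 2)).flatMap
              (fun j : Nat => if i = 0 ∨ i = (m : Int) + 2 - 1 ∨ (j : Int) = 0 ∨ (j : Int) = (m : Int) + 2 - 1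
                then ['*'] else [' ']))) ∘ (fun k : Nat => (k : Int))) k =
            (fun k => if k = 0 ∨ k = m + 1
              then String.ofList (List.replicate (m + 2) '*')
              else String.ofList ('*' :: (List.replicate m ' ' ++ ['*']))) k := by
        intro k hk
        have hklt : k < m + 2 := List.mem_range.mp hk
        simp only [Function.comp_apply]
        have hsing : (List.range (m + 2)).flatMap
            (fun j : Nat => if (k : Int) = 0 ∨ (k : Int) = (m : Int) + 2 - 1 ∨ (j : Int) = 0 ∨ (j : Int) = (m : Int) + 2 - 1
              then ['*'] else [' ']) =
            (List.range (m + 2)).map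
            (fun j : Nat => if (k : Int) = 0 ∨ (k : Int) = (m : Int) + 2 - 1 ∨ (j : Int) = 0 ∨ (j : Int) = (m : Int) + 2 - 1
              then '*' else ' ') := by
          rw [List.map_eq_flatMap]
          have hf : (fun j : Nat => if (k : Int) = 0 ∨ (k : Int) = (m : Int) + 2 - 1 ∨ (j : Int) = 0 ∨ (j : Int) = (m : Int) + 2 - 1
              then ['*'] else ([' '] : List Char)) =
              (fun j : Nat => [if (k : Int) = 0 ∨ (k : Int) = (m : Int) + 2 - 1 ∨ (j : Int) = 0 ∨ (j : Int) = (m : Int) + 2 - 1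
              then '*' else ' ']) := by
            funext j
            exact (apply_ite (fun c : Char => ([c] : List Char)) _ '*' ' ').symm
          rw [hf]
        rw [hsing, rowChars m k hklt]
        by_cases hc : k = 0 ∨ k = m + 1
        · rw [if_pos hc, if_pos hc]
        · rw [if_neg hc, if_neg hc]
      rw [List.map_congr_left hrow, rowShape]
      simp
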